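-- pv_equiv track=rewrite | github.com/inxm-ai/enterprise-mcp-bridge | app/well_known/agent.py | get_as_list
-- ===== SOURCE A (Python) =====
-- def get_as_list(reply: str) -> list[str]:
--     if not reply:
--         return []
--     lines = reply.split("\n")
--     items = []
--     current = None
--     for line in lines:
--         stripped = line.lstrip()
--         if stripped.startswith("-") or stripped.startswith("*"):
--             content = stripped[1:].strip()
--             if current is not None:
--                 items.append(current)
--             current = content
--         elif current is not None:
--             if line.strip() == "":
--                 current += "\n"
--             else:
--                 current += "\n" + line
--     if current is not None:
--         items.append(current)
--     return [item.strip() for item in items]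
-- ===== SOURCE B (Python) =====
-- def get_as_list(reply: str) -> list[str]:
--     def is_marker(line: str) -> bool:
--         s = line.lstrip()
--         return s.startswith("-") or s.startswith("*")
--
--     lines = reply.split("\n")
--     n = len(lines)
--     i = 0
--     while i < n and not is_marker(lines[i]):
--         i += 1
--     items = []
--     while i < n:
--         j = i + 1
--         while j < n and not is_marker(lines[j]):
--             j += 1
--         block = lines[i:j]
--         head = block[0].lstrip()[1:].strip()
--         parts = [head] + ["" if l.strip() == "" else l for l in block[1:]]
--         items.append("\n".join(parts).strip())
--         i = j
--     return items
-- ===== Notes on version B (the rewrite author's own statement) =====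
-- stated objective: alternative
-- what changed: Replaces A's single-pass running-string accumulator (items list + mutable current) with a two-phase pass: locate the marker lines, then slice each marker-to-marker block of lines and assemble the item by joining its pieces.
import Mathlib
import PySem

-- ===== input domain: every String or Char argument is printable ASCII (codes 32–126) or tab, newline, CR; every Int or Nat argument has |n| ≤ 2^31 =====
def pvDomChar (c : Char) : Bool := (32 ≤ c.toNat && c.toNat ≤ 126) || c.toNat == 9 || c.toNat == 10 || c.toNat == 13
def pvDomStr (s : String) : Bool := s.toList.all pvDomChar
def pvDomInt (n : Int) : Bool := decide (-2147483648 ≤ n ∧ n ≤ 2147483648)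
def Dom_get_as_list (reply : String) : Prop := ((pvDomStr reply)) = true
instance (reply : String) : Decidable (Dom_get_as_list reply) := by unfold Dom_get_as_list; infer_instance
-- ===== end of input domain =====

-- B replaces A's running-string accumulator with a two-phase pass: locate the marker lines,
-- then build each item from its block of lines (objective: alternative decomposition, same cost).

-- ===== PORT A =====
-- one fold step of A's `for line in lines` loop over the state (items, current)
def pvStepA (st : List String × Option String) (line : String) : List String × Option String :=
  let stripped := PySem.Str.lstrip line
  if PySem.Str.startswith stripped "-" || PySem.Str.startswith stripped "*" then
    let content := PySem.Str.strip (PySem.Str.slice stripped (some 1) none)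
    (match st.2 with
     | some c => st.1 ++ [c]
     | none => st.1, some content)
  else
    match st.2 with
    | some c =>
      if PySem.Str.strip line = "" then (st.1, some (c ++ "\n"))
      else (st.1, some (c ++ "\n" ++ line))
    | none => st

def get_as_list (reply : String) : List String :=
  if reply = "" then []
  else
    let lines := (PySem.Str.split? reply "\n").getD []
    let st := lines.foldl pvStepA ([], none)
    let items := match st.2 with
      | some c => st.1 ++ [c]
      | none => st.1
    items.map PySem.Str.strip

-- ===== PORT B =====
def pvIsMarker (line : String) : Bool :=
  PySem.Str.startswith (PySem.Str.lstrip line) "-" || PySem.Str.startswith (PySem.Str.lstrip line) "*"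

-- '' for a blank continuation line, the original line otherwise
def pvPiece (line : String) : String := if PySem.Str.strip line = "" then "" else line

-- head of an item: marker line without the bullet, stripped
def pvHead (m : String) : String := PySem.Str.strip (PySem.Str.slice (PySem.Str.lstrip m) (some 1) none)

-- B's second phase: the first line is a marker; scan to the next marker, assemble the block, repeat
def pvBlocks : List String → List String
  | [] => []
  | m :: rest =>
    let cont := rest.takeWhile (fun l => !pvIsMarker l)
    let rest' := rest.dropWhile (fun l => !pvIsMarker l)
    PySem.Str.strip (PySem.Str.join "\n" (pvHead m :: cont.map pvPiece)) :: pvBlocks rest'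
termination_by ls => ls.length
decreasing_by
  simpa using Nat.lt_succ_of_le (List.length_dropWhile_le _ _)

def get_as_list_alt (reply : String) : List String :=
  pvBlocks (((PySem.Str.split? reply "\n").getD []).dropWhile (fun l => !pvIsMarker l))

-- ===== PRECONDITION & SPEC =====
def Spec_get_as_list (reply : String) (out : List String) : Prop := out = get_as_list_alt reply
instance (reply : String) (out : List String) : Decidable (Spec_get_as_list reply out) := by unfold Spec_get_as_list; infer_instance

-- ===== CLAIM (what is proved, stated in full; the proofs are below) =====
def Claim_equal_get_as_list : Prop := ∀ (reply : String), Dom_get_as_list reply → Spec_get_as_list reply (get_as_list reply)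

-- ===== LEMMAS AND PROOFS =====

-- A's wrap-up of the loop state into the returned list
def pvFinishA (st : List String × Option String) : List String :=
  (match st.2 with
   | some c => st.1 ++ [c]
   | none => st.1).map PySem.Str.strip

theorem strJoinCons (sep p q : String) (rest : List String) :
    PySem.Str.join sep (p :: q :: rest) = p ++ sep ++ PySem.Str.join sep (q :: rest) := by
  simp [PySem.Str.join, PySem.Chars.join_cons_cons, String.append_assoc]

theorem joinSingleton (c : String) : PySem.Str.join "\n" [c] = c := by
  simp [PySem.Str.join, PySem.Chars.join, List.intercalate]

theorem joinShift (c x : String) (xs : List String) :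
    PySem.Str.join "\n" (c :: x :: xs) = PySem.Str.join "\n" ((c ++ "\n" ++ x) :: xs) := by
  cases xs with
  | nil => rw [strJoinCons, joinSingleton, joinSingleton]
  | cons y ys =>
    rw [strJoinCons "\n" c x, strJoinCons "\n" x y, strJoinCons "\n" (c ++ "\n" ++ x) y]
    simp [String.append_assoc]

theorem joinFold (xs : List String) (c : String) :
    PySem.Str.join "\n" (c :: xs) = xs.foldl (fun a x => a ++ "\n" ++ x) c := by
  induction xs generalizing c with
  | nil => exact joinSingleton c
  | cons x xs ih => rw [joinShift, ih, List.foldl_cons]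

theorem pvBlocks_nil : pvBlocks [] = [] := by rw [pvBlocks]

theorem pvBlocks_cons (m : String) (rest : List String) :
    pvBlocks (m :: rest) =
      PySem.Str.strip (PySem.Str.join "\n" (pvHead m :: (rest.takeWhile (fun l => !pvIsMarker l)).map pvPiece)) ::
        pvBlocks (rest.dropWhile (fun l => !pvIsMarker l)) := by
  rw [pvBlocks]

-- loop invariant while a current item is open
theorem foldA_some (lines : List String) (items : List String) (c : String) :
    pvFinishA (lines.foldl pvStepA (items, some c)) =
      items.map PySem.Str.strip ++
        PySem.Str.strip (PySem.Str.join "\n" (c :: (lines.takeWhile (fun l => !pvIsMarker l)).map pvPiece)) ::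
          pvBlocks (lines.dropWhile (fun l => !pvIsMarker l)) := by
  induction lines generalizing items c with
  | nil => simp [pvFinishA, pvBlocks_nil, joinSingleton]
  | cons l ls ih =>
    by_cases h : pvIsMarker l = true
    · have hstep : pvStepA (items, some c) l = (items ++ [c], some (pvHead l)) := by
        simp only [pvIsMarker] at h
        simp only [pvStepA, h, if_true, pvHead]
      rw [List.foldl_cons, hstep, ih]
      rw [List.takeWhile_cons, List.dropWhile_cons]
      simp [h, pvBlocks_cons, joinSingleton]
    · have hb : pvIsMarker l = false := by simpa using h
      have hstep : pvStepA (items, some c) l = (items, some (c ++ "\n" ++ pvPiece l)) := by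
        simp only [pvIsMarker] at hb
        simp only [pvStepA, hb, Bool.false_eq_true, if_false, pvPiece]
        split_ifs with hblank
        · simp
        · rfl
      rw [List.foldl_cons, hstep, ih]
      rw [List.takeWhile_cons, List.dropWhile_cons]
      simp [hb, joinFold]

-- loop invariant before the first marker is seen
theorem foldA_none (lines : List String) (items : List String) :
    pvFinishA (lines.foldl pvStepA (items, none)) =
      items.map PySem.Str.strip ++ pvBlocks (lines.dropWhile (fun l => !pvIsMarker l)) := by
  induction lines generalizing items with
  | nil => simp [pvFinishA, pvBlocks_nil]
  | cons l ls ih =>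
    by_cases h : pvIsMarker l = true
    · have hstep : pvStepA (items, none) l = (items, some (pvHead l)) := by
        simp only [pvIsMarker] at h
        simp only [pvStepA, h, if_true, pvHead]
      rw [List.foldl_cons, hstep, foldA_some]
      rw [List.dropWhile_cons]
      simp [h, pvBlocks_cons]
    · have hb : pvIsMarker l = false := by simpa using h
      have hstep : pvStepA (items, none) l = (items, none) := by
        simp only [pvIsMarker] at hb
        simp only [pvStepA, hb, Bool.false_eq_true, if_false]
      rw [List.foldl_cons, hstep, ih]
      rw [List.dropWhile_cons]
      simp [hb]

-- ===== VERDICT (by name: the statement is the Claim_ definition above) =====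
theorem get_as_list_spec : Claim_equal_get_as_list := by
  intro reply _
  unfold Spec_get_as_list get_as_list get_as_list_alt
  by_cases h : reply = ""
  · subst h
    rw [if_pos rfl]
    have h1 : (PySem.Str.split? "" "\n").getD [] = [""] := by decide
    have h2 : pvIsMarker "" = false := by decide
    rw [h1]
    simp [h2, pvBlocks_nil]
  · simp only [if_neg h]
    have := foldA_none ((PySem.Str.split? reply "\n").getD []) []
    simpa [pvFinishA] using this
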